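-- pv_equiv track=rewrite | github.com/ndhakal-code/CSC-Research | main.py | run_memory_compaction
-- ===== SOURCE A (Python) =====
-- def run_memory_compaction(mem_layout):
--     temp_layout = []
--     curr_memory = 1023
--     for i in range(len(mem_layout) - 1, -1, -1):
--         mem = mem_layout[i][1] - mem_layout[i][0]
--         temp_layout.append((curr_memory - mem, curr_memory))
--         curr_memory = curr_memory - mem - 1
--     temp_layout = temp_layout[::-1]
--     return temp_layout
-- ===== SOURCE B (Python) =====
-- def run_memory_compaction(mem_layout):
--     total = sum(hi - lo for lo, hi in mem_layout)
--     start = 1023 - total - (len(mem_layout) - 1)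
--     result = []
--     for lo, hi in mem_layout:
--         size = hi - lo
--         result.append((start, start + size))
--         start = start + size + 1
--     return result
-- ===== Notes on version B (the rewrite author's own statement) =====
-- stated objective: simpler
-- what changed: Replaced the backward index loop from address 1023 plus a final list reversal by a precomputed total-size closed form for the first block's start address followed by a single forward pass with no reversal.
import Mathlib
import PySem

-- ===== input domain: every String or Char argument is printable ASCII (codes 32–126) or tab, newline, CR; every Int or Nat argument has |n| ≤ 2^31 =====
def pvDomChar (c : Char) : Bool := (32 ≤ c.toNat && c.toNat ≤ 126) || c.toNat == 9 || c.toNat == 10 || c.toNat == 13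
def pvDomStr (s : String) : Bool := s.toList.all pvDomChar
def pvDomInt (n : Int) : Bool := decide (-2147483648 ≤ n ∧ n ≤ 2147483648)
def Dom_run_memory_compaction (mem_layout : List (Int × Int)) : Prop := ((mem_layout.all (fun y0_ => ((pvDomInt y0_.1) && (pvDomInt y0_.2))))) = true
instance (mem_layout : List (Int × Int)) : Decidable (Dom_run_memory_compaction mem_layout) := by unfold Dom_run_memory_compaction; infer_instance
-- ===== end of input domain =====

-- ===== PORT A =====
-- port of A: backward index loop over range(len-1, -1, -1), appending (curr-mem, curr),
-- then temp_layout[::-1]; mem_layout[i] is always in range here, so the pyGetD default is never used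
def run_memory_compaction (mem_layout : List (Int × Int)) : List (Int × Int) :=
  let st := (PySem.List.pyRange ((mem_layout.length : Int) - 1) (-1) (-1)).foldl
    (fun (st : List (Int × Int) × Int) i =>
      let p := PySem.List.pyGetD mem_layout i ((0 : Int), (0 : Int))
      let mem := p.2 - p.1
      (st.1 ++ [(st.2 - mem, st.2)], st.2 - mem - 1)) ([], 1023)
  (PySem.List.slice? st.1 none none (-1)).getD []

-- ===== PORT B =====
-- B's forward loop: append (start, start+size), advance start by size+1
def run_memory_compaction_go : List (Int × Int) → Int → List (Int × Int)
  | [], _ => []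
  | b :: rest, start => (start, start + (b.2 - b.1)) :: run_memory_compaction_go rest (start + (b.2 - b.1) + 1)

def run_memory_compaction_alt (mem_layout : List (Int × Int)) : List (Int × Int) :=
  let total := (mem_layout.map (fun b => b.2 - b.1)).sum
  run_memory_compaction_go mem_layout (1023 - total - ((mem_layout.length : Int) - 1))

-- ===== PRECONDITION & SPEC =====
def Spec_run_memory_compaction (mem_layout : List (Int × Int)) (out : List (Int × Int)) : Prop := out = run_memory_compaction_alt mem_layout
instance (mem_layout : List (Int × Int)) (out : List (Int × Int)) : Decidable (Spec_run_memory_compaction mem_layout out) := by unfold Spec_run_memory_compaction; infer_instance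

-- ===== CLAIM (what is proved, stated in full; the proofs are below) =====
def Claim_equal_run_memory_compaction : Prop := ∀ (mem_layout : List (Int × Int)), Dom_run_memory_compaction mem_layout → Spec_run_memory_compaction mem_layout (run_memory_compaction mem_layout)

-- ===== LEMMAS AND PROOFS =====

-- backward processor: the list A's loop builds (in processing order), abstracted from the fold
def pvBack : List (Int × Int) → Int → List (Int × Int)
  | [], _ => []
  | b :: rest, c => (c - (b.2 - b.1), c) :: pvBack rest (c - (b.2 - b.1) - 1)

def pvStep (st : List (Int × Int) × Int) (p : Int × Int) : List (Int × Int) × Int :=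
  (st.1 ++ [(st.2 - (p.2 - p.1), st.2)], st.2 - (p.2 - p.1) - 1)

theorem pvFold_eq_pvBack (xs : List (Int × Int)) (acc : List (Int × Int)) (c : Int) :
    (xs.foldl pvStep (acc, c)).1 = acc ++ pvBack xs c := by
  induction xs generalizing acc c with
  | nil => simp [pvBack]
  | cons b rest ih => simp [pvBack, pvStep, List.foldl, ih]

theorem pvGo_append (l : List (Int × Int)) (p : Int × Int) (s : Int) :
    run_memory_compaction_go (l ++ [p]) s
      = run_memory_compaction_go l s
        ++ [(s + (l.map (fun b => b.2 - b.1)).sum + l.length,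
             s + (l.map (fun b => b.2 - b.1)).sum + l.length + (p.2 - p.1))] := by
  induction l generalizing s with
  | nil => simp [run_memory_compaction_go]
  | cons q rest ih =>
      simp only [List.cons_append, run_memory_compaction_go, ih, List.map_cons, List.sum_cons,
        List.length_cons]
      push_cast
      ring_nf

theorem pvBack_rev (l : List (Int × Int)) (c : Int) :
    (pvBack l.reverse c).reverse
      = run_memory_compaction_go l (c - (l.map (fun b => b.2 - b.1)).sum - ((l.length : Int) - 1)) := by
  induction l using List.reverseRecOn generalizing c with
  | nil => simp [pvBack, run_memory_compaction_go]
  | append_singleton l p ih =>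
      rw [show (l ++ [p]).reverse = p :: l.reverse by simp]
      simp only [pvBack, List.reverse_cons, ih, pvGo_append, List.map_append, List.sum_append,
        List.map_cons, List.sum_cons, List.length_append, List.map_nil, List.sum_nil,
        List.length_cons, List.length_nil]
      push_cast
      ring_nf

-- the fold over pyRange(n-1,-1,-1) with pyGetD is the fold over the reversed list
theorem pvRange_fold (xs : List (Int × Int)) (init : List (Int × Int) × Int) :
    (PySem.List.pyRange ((xs.length : Int) - 1) (-1) (-1)).foldl
      (fun st i => pvStep st (PySem.List.pyGetD xs i ((0 : Int), (0 : Int)))) init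
      = xs.reverse.foldl pvStep init := by
  rw [PySem.List.pyRange_neg_one_eq_reverse,
    show ((-1 : Int) + 1) = 0 by norm_num,
    show ((xs.length : Int) - 1 + 1) = (xs.length : Int) by ring,
    ← List.foldl_map (f := fun i => PySem.List.pyGetD xs i ((0 : Int), (0 : Int))) (g := pvStep),
    List.map_reverse, PySem.List.map_pyGetD_pyRange_zero']

theorem run_memory_compaction_spec : Claim_equal_run_memory_compaction := by
  intro l _
  show run_memory_compaction l = run_memory_compaction_alt l
  have hA : run_memory_compaction l
      = ((PySem.List.pyRange ((l.length : Int) - 1) (-1) (-1)).foldl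
          (fun st i => pvStep st (PySem.List.pyGetD l i ((0 : Int), (0 : Int))))
          ([], 1023)).1.reverse := by
    simp only [run_memory_compaction, pvStep, PySem.List.slice?_none_none_neg_one, Option.getD_some]
  rw [hA, pvRange_fold, pvFold_eq_pvBack, List.nil_append]
  simpa [run_memory_compaction_alt] using pvBack_rev l 1023
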